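-- pv_equiv track=rewrite | github.com/ShahViraj11/CSE-231-Projects | Projects/Project 8.py | find_max_second_friends
-- ===== SOURCE A (Python) =====
-- def find_max_second_friends(seconds_dict):
--     """
--     consider second-order friendships, that is, friends of friends. In the
--     previous function you created a dictionary of such friendships. Now similar to finding
--     max friends you will find max second-order friends.
--
--     Parameter: dictionary
--     Returns: list of strings, int
--     """
--     example_list = []
--     names_list = list(seconds_dict.keys())
--     final_list = []
--     for x in seconds_dict:
--         example_list.append(len(seconds_dict[x]))
--     max_frnds = max(example_list)
--     for i, num in enumerate(example_list):
--         if num == max_frnds: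
--             final_list.append(names_list[i])
--
--     return final_list, max_frnds
-- ===== SOURCE B (Python) =====
-- def find_max_second_friends(seconds_dict):
--     best = 0
--     result = []
--     for name, friends in seconds_dict.items():
--         count = len(friends)
--         if count > best:
--             best = count
--             result = [name]
--         elif count == best:
--             result.append(name)
--     return result, best
-- ===== Notes on version B (the rewrite author's own statement) =====
-- stated objective: simpler
-- what changed: One pass maintaining the running best count and the list of tied names, instead of A's three passes (build a parallel list of lengths, take max(), then re-scan with enumerate to collect names by index); Pre_ excludes the empty dict, where A's max([]) raises ValueError, and association lists with duplicate keys, which do not represent a Python dict.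
-- outside the precondition, e.g. on find_max_second_friends({}): A raises ValueError, B returns ([], 0)
import Mathlib
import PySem

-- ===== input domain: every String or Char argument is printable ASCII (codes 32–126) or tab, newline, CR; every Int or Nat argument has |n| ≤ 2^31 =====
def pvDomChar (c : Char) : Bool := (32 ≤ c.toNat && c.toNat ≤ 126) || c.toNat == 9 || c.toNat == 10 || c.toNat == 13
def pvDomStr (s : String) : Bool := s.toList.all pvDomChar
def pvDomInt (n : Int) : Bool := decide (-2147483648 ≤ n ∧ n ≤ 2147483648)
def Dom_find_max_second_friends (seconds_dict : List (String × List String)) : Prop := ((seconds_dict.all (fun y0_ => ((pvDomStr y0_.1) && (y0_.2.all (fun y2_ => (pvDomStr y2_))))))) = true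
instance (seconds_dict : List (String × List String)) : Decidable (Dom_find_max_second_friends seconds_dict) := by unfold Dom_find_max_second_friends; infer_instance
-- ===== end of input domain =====

-- B replaces A's three passes (length list, max(), enumerate re-scan) by one pass keeping the
-- running best count and the tied names; return-value equivalence, no argument is mutated.

-- ===== PORT A =====
def find_max_second_friends (seconds_dict : List (String × List String)) : List String × Int :=
  let d := PySem.Dict.mk seconds_dict
  let names_list := d.keys
  -- for x in seconds_dict: example_list.append(len(seconds_dict[x]))  (key always present: getD)
  let example_list : List Int :=
    names_list.foldl (fun acc x => acc ++ [((d.getD x []).length : Int)]) []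
  -- max(example_list); Pre_ excludes the empty dict, where Python's max([]) raises ValueError
  let max_frnds : Int := (PySem.List.max? example_list (fun y => y)).getD 0
  let final_list : List String :=
    (PySem.List.enumerate example_list 0).foldl
      (fun acc p => if p.2 = max_frnds then acc ++ [PySem.List.pyGetD names_list p.1 ""] else acc) []
  (final_list, max_frnds)

-- ===== PORT B =====
def find_max_second_friends_alt (seconds_dict : List (String × List String)) : List String × Int :=
  let s :=
    seconds_dict.foldl
      (fun (st : Int × List String) p =>
        let c : Int := p.2.length
        if st.1 < c then (c, [p.1])
        else if c = st.1 then (st.1, st.2 ++ [p.1]) else st)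
      (0, [])
  (s.2, s.1)

-- ===== PRECONDITION & SPEC =====
-- Pre_ excludes (a) the empty dict, where A's max([]) raises ValueError, and (b) association
-- lists with duplicate keys, which do not represent a Python dict (the dict collapses them
-- before either program runs).
def Pre_find_max_second_friends (seconds_dict : List (String × List String)) : Prop :=
  seconds_dict ≠ [] ∧ (seconds_dict.map Prod.fst).Nodup
instance (seconds_dict : List (String × List String)) : Decidable (Pre_find_max_second_friends seconds_dict) := by unfold Pre_find_max_second_friends; infer_instance
def pvWitness_find_max_second_friends : (List (String × List String)) :=
  [("a", ["x", "y"]), ("b", ["z"]), ("c", ["u", "v"])]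

def Spec_find_max_second_friends (seconds_dict : List (String × List String)) (out : List String × Int) : Prop := out = find_max_second_friends_alt seconds_dict
instance (seconds_dict : List (String × List String)) (out : List String × Int) : Decidable (Spec_find_max_second_friends seconds_dict out) := by unfold Spec_find_max_second_friends; infer_instance

-- ===== CLAIM (what is proved, stated in full; the proofs are below) =====
def Claim_equal_find_max_second_friends : Prop := ∀ (seconds_dict : List (String × List String)), Dom_find_max_second_friends seconds_dict → Pre_find_max_second_friends seconds_dict → Spec_find_max_second_friends seconds_dict (find_max_second_friends seconds_dict)

-- ===== LEMMAS AND PROOFS =====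

-- A's enumerate loop collects, in order, the names paired with a length equal to mx.
theorem selA (mx : Int) (Z : List (String × Int)) : ∀ (s : Nat) (names : List String) (acc : List String),
    (∀ k (hk : k < Z.length), names[s + k]? = some (Z[k].1)) →
    (PySem.List.enumerate (Z.map Prod.snd) (s : Int)).foldl
      (fun acc p => if p.2 = mx then acc ++ [PySem.List.pyGetD names p.1 ""] else acc) acc
    = acc ++ (Z.filter (fun q => q.2 = mx)).map Prod.fst := by
  induction Z with
  | nil => intro s names acc _; simp [PySem.List.enumerate_nil]
  | cons hd tl ih =>
    intro s names acc hnames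
    have h0 : names[s]? = some hd.1 := by simpa using hnames 0 (by simp)
    have hget : PySem.List.pyGetD names (s : Int) "" = hd.1 := by
      have hlt : s < names.length := (List.getElem?_eq_some_iff.mp h0).1
      rw [PySem.List.pyGetD_natCast]
      simp [List.getD, h0]
    have hstep : ((s : Int) + 1) = ((s + 1 : Nat) : Int) := by push_cast; ring
    simp only [List.map_cons, PySem.List.enumerate_cons, List.foldl_cons, hstep]
    rw [ih (s + 1) names _ (by intro k hk; simpa [Nat.add_assoc, Nat.add_comm, Nat.add_left_comm] using hnames (k + 1) (by simpa using hk))]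
    by_cases h : hd.2 = mx <;> simp [h, hget]

-- B's loop, started in state (b, r): the best becomes the running max of b and the
-- lengths, and the collected names are exactly those whose length equals that max
-- (prefixed by r when b itself stays maximal).
theorem selB (l : List (String × List String)) : ∀ (b : Int) (r : List String),
    l.foldl
      (fun (st : Int × List String) p =>
        let c : Int := p.2.length
        if st.1 < c then (c, [p.1])
        else if c = st.1 then (st.1, st.2 ++ [p.1]) else st)
      (b, r)
    = (l.foldl (fun a p => max a (p.2.length : Int)) b,
       (if b = l.foldl (fun a p => max a (p.2.length : Int)) b then r else [])
         ++ (l.filter (fun p => (p.2.length : Int) = l.foldl (fun a q => max a (q.2.length : Int)) b)).map Prod.fst) := by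
  induction l with
  | nil => intro b r; simp
  | cons p t ih =>
    intro b r
    have hle : ∀ (b0 : Int), b0 ≤ t.foldl (fun a q => max a (q.2.length : Int)) b0 := by
      intro b0
      have h := (PySem.List.le_foldl_max (t.map (fun q : String × List String => (q.2.length : Int))) b0).1
      rwa [List.foldl_map] at h
    simp only [List.foldl_cons, List.filter_cons]
    by_cases hbc : b < (p.2.length : Int)
    · rw [if_pos hbc, ih]
      simp only [show max b (p.2.length : Int) = (p.2.length : Int) from max_eq_right hbc.le]
      have hbM : b ≠ t.foldl (fun a q => max a (q.2.length : Int)) (p.2.length : Int) := by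
        have := hle (p.2.length : Int); omega
      by_cases hcM : ((p.2.length : Int)) = t.foldl (fun a q => max a (q.2.length : Int)) (p.2.length : Int)
      · simp [← hcM, hbc.ne]
      · simp [hcM, hbM]
    · rw [if_neg hbc]
      by_cases hcb : ((p.2.length : Int)) = b
      · rw [if_pos hcb, ih]
        simp only [show max b (p.2.length : Int) = b from max_eq_left (not_lt.mp hbc)]
        by_cases hbM : b = t.foldl (fun a q => max a (q.2.length : Int)) b
        · simp [← hbM, hcb]
        · simp [hcb, hbM]
      · rw [if_neg hcb, ih]
        simp only [show max b (p.2.length : Int) = b from max_eq_left (not_lt.mp hbc)]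
        have hcM : ¬ ((p.2.length : Int)) = t.foldl (fun a q => max a (q.2.length : Int)) b := by
          have h1 := hle b
          have h2 : (p.2.length : Int) < b := lt_of_le_of_ne (not_lt.mp hbc) hcb
          omega
        simp [hcM]

-- A on a nonempty dict with distinct keys: the names whose second-order list has maximal
-- length, in order, together with that maximum.
theorem A_char (p0 : String × List String) (rest : List (String × List String))
    (hnd : (((p0 :: rest).map Prod.fst)).Nodup) :
    find_max_second_friends (p0 :: rest)
    = (((p0 :: rest).filter (fun p => (p.2.length : Int) =
          rest.foldl (fun a q => max a (q.2.length : Int)) (p0.2.length : Int))).map Prod.fst,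
       rest.foldl (fun a q => max a (q.2.length : Int)) (p0.2.length : Int)) := by
  set sd := p0 :: rest with hsd
  have hkeys : (PySem.Dict.mk sd).keys = sd.map Prod.fst := rfl
  have hex :
      ((PySem.Dict.mk sd).keys).foldl
        (fun acc x => acc ++ [(((PySem.Dict.mk sd).getD x []).length : Int)]) []
      = sd.map (fun p => (p.2.length : Int)) := by
    rw [PySem.List.foldl_append_singleton_eq_map]
    have hv : (PySem.Dict.mk sd).keys.map (fun k => (PySem.Dict.mk sd).getD k []) = sd.map Prod.snd :=
      (PySem.Dict.values_eq_map_keys _ (by rw [hkeys]; exact hnd) []).symm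
    calc ([] : List Int) ++ (PySem.Dict.mk sd).keys.map (fun x => (((PySem.Dict.mk sd).getD x []).length : Int))
        = ((PySem.Dict.mk sd).keys.map (fun k => (PySem.Dict.mk sd).getD k [])).map (fun v => (v.length : Int)) := by
          simp [List.map_map]
      _ = (sd.map Prod.snd).map (fun v => (v.length : Int)) := by rw [hv]
      _ = sd.map (fun p => (p.2.length : Int)) := by simp [List.map_map]
  have hM : ((rest.map (fun p : String × List String => (p.2.length : Int))).foldl max (p0.2.length : Int))
      = rest.foldl (fun a q => max a (q.2.length : Int)) (p0.2.length : Int) :=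
    by rw [List.foldl_map]
  have hmax : (PySem.List.max? (sd.map (fun p => (p.2.length : Int))) (fun y => y)).getD 0
      = rest.foldl (fun a q => max a (q.2.length : Int)) (p0.2.length : Int) := by
    rw [hsd, List.map_cons, PySem.List.max?_id_cons, Option.getD_some, hM]
  have hZsnd : sd.map (fun p => (p.2.length : Int))
      = (sd.map (fun p => (p.1, (p.2.length : Int)))).map Prod.snd := by
    simp [List.map_map]
  have hnames : ∀ k (hk : k < (sd.map (fun p => (p.1, (p.2.length : Int)))).length),
      (sd.map Prod.fst)[0 + k]? = some ((sd.map (fun p => (p.1, (p.2.length : Int))))[k].1) := by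
    intro k hk
    simp at hk
    simp [List.getElem?_map, List.getElem?_eq_getElem hk]
  have hsel := selA (rest.foldl (fun a q => max a (q.2.length : Int)) (p0.2.length : Int))
      (sd.map (fun p => (p.1, (p.2.length : Int)))) 0 (sd.map Prod.fst) [] hnames
  simp only [Nat.cast_zero] at hsel
  simp only [find_max_second_friends]
  rw [hex, hmax, hkeys]
  rw [← hZsnd] at hsel
  rw [Prod.mk.injEq]
  exact ⟨hsel.trans (by simp [List.filter_map, List.map_map, Function.comp_def]), rfl⟩

-- B on a nonempty dict computes the same pair (the first step always produces the state
-- (len p0, [p0.1]) because lengths are non-negative).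
theorem B_char (p0 : String × List String) (rest : List (String × List String)) :
    find_max_second_friends_alt (p0 :: rest)
    = (((p0 :: rest).filter (fun p => (p.2.length : Int) =
          rest.foldl (fun a q => max a (q.2.length : Int)) (p0.2.length : Int))).map Prod.fst,
       rest.foldl (fun a q => max a (q.2.length : Int)) (p0.2.length : Int)) := by
  have hfirst :
      ((fun (st : Int × List String) p =>
          let c : Int := p.2.length
          if st.1 < c then (c, [p.1])
          else if c = st.1 then (st.1, st.2 ++ [p.1]) else st)
        ((0 : Int), ([] : List String)) p0) = ((p0.2.length : Int), [p0.1]) := by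
    cases hp : p0.2 with
    | nil => simp [hp]
    | cons a l => simp [hp]
  simp only [find_max_second_friends_alt, List.foldl_cons, hfirst]
  rw [selB rest (p0.2.length : Int) [p0.1]]
  rw [List.filter_cons]
  by_cases h : (p0.2.length : Int) = rest.foldl (fun a q => max a (q.2.length : Int)) (p0.2.length : Int)
  · simp [← h]
  · simp [h]

-- ===== VERDICT =====
theorem find_max_second_friends_spec : Claim_equal_find_max_second_friends := by
  intro sd hdom hpre
  obtain ⟨hne, hnd⟩ := hpre
  obtain ⟨p0, rest, rfl⟩ : ∃ p0 rest, sd = p0 :: rest := by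
    cases sd with
    | nil => exact absurd rfl hne
    | cons a t => exact ⟨a, t, rfl⟩
  unfold Spec_find_max_second_friends
  rw [A_char p0 rest hnd, B_char p0 rest]
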